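-- pv_equiv track=rewrite | github.com/FernandoFrancoF/TopicosDeIA | Unidad2/Tarea2/8Reinas.py | generar_vecindario
-- ===== SOURCE A (Python) =====
-- def contar_colisiones(solucion):
--     n = len(solucion)
--     colisiones = 0
--     for i in range(n):
--         for j in range(i + 1, n):
--             if abs(solucion[i] - solucion[j]) == abs(i - j):
--                 colisiones += 1
--     return colisiones
--
-- def generar_vecindario(solucion):
--     vecindario = []
--     n = len(solucion)
--     for i in range(n):
--         for j in range(i + 1, n):
--             vecino = solucion[:]
--             vecino[i], vecino[j] = vecino[j], vecino[i]
--             vecindario.append((vecino, contar_colisiones(vecino)))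
--     return sorted(vecindario, key=lambda x: x[1])
-- ===== SOURCE B (Python) =====
-- def contar_colisiones_lineal(solucion):
--     # one left-to-right pass over diagonals: queens at i<j collide iff
--     # v_i - i == v_j - j or v_i + i == v_j + j (mutually exclusive for i != j)
--     d1 = {}
--     d2 = {}
--     c = 0
--     d1_get = d1.get
--     d2_get = d2.get
--     for i, v in enumerate(solucion):
--         a = v - i
--         b = v + i
--         x = d1_get(a, 0)
--         y = d2_get(b, 0)
--         c += x + y
--         d1[a] = x + 1
--         d2[b] = y + 1
--     return c
--
-- def generar_vecindario(solucion):
--     n = len(solucion)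
--     vecinos = [solucion[:i] + [solucion[j]] + solucion[i + 1:j] + [solucion[i]] + solucion[j + 1:]
--                for i in range(n) for j in range(i + 1, n)]
--     vecindario = [(v, contar_colisiones_lineal(v)) for v in vecinos]
--     return sorted(vecindario, key=lambda x: x[1])
-- ===== Notes on version B (the rewrite author's own statement) =====
-- stated objective: faster
-- what changed: Each neighbor's collision count is computed in one dictionary pass over the diagonals v-i and v+i instead of A's all-pairs double loop, and each swapped neighbor is built by slice concatenation instead of copy-and-assign.
import Mathlib
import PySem

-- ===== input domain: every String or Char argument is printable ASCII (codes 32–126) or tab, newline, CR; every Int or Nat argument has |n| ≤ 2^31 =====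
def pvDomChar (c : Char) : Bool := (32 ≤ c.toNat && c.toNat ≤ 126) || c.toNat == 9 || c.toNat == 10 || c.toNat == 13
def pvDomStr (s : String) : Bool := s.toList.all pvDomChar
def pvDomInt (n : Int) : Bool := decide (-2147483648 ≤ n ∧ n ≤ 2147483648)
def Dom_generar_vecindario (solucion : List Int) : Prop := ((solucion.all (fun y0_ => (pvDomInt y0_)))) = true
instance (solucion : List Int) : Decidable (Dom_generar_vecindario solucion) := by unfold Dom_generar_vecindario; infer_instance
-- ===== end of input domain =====

-- B replaces A's O(n^2)-per-neighbor pairwise collision scan by a single diagonal-counting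
-- dictionary pass per neighbor and builds each swapped neighbor by slicing; objective: faster.


-- ===== PORT A =====
def contar_colisiones (solucion : List Int) : Int :=
  let n : Int := solucion.length
  (PySem.List.pyRange 0 n 1).foldl (fun colisiones i =>
    (PySem.List.pyRange (i + 1) n 1).foldl (fun colisiones j =>
      if (PySem.List.pyGetD solucion i 0 - PySem.List.pyGetD solucion j 0).natAbs = (i - j).natAbs
      then colisiones + 1 else colisiones) colisiones) 0

def generar_vecindario (solucion : List Int) : List (List Int × Int) :=
  let n : Int := solucion.length
  let vecindario := (PySem.List.pyRange 0 n 1).foldl (fun acc i =>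
    (PySem.List.pyRange (i + 1) n 1).foldl (fun acc j =>
      let vecino := solucion
      let tmp := (PySem.List.pyGetD vecino j 0, PySem.List.pyGetD vecino i 0)
      let vecino := PySem.List.pySetD vecino i tmp.1
      let vecino := PySem.List.pySetD vecino j tmp.2
      acc ++ [(vecino, contar_colisiones vecino)]) acc) []
  PySem.List.sorted vecindario (fun x => x.2) false

-- ===== PORT B =====
def contar_colisiones_lineal (solucion : List Int) : Int :=
  let st := (PySem.List.enumerate solucion 0).foldl
    (fun (st : PySem.Dict Int Int × PySem.Dict Int Int × Int) iv =>
      let i := iv.1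
      let v := iv.2
      let d1 := st.1
      let d2 := st.2.1
      let c := st.2.2 + d1.getD (v - i) 0 + d2.getD (v + i) 0
      (d1.insert (v - i) (d1.getD (v - i) 0 + 1), d2.insert (v + i) (d2.getD (v + i) 0 + 1), c))
    (PySem.Dict.empty, PySem.Dict.empty, 0)
  st.2.2

def generar_vecindario_alt (solucion : List Int) : List (List Int × Int) :=
  let n : Int := solucion.length
  let vecinos := (PySem.List.pyRange 0 n 1).flatMap (fun i =>
    (PySem.List.pyRange (i + 1) n 1).map (fun j =>
      PySem.List.slice solucion none (some i) ++ [PySem.List.pyGetD solucion j 0]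
        ++ PySem.List.slice solucion (some (i + 1)) (some j) ++ [PySem.List.pyGetD solucion i 0]
        ++ PySem.List.slice solucion (some (j + 1)) none))
  let vecindario := vecinos.map (fun v => (v, contar_colisiones_lineal v))
  PySem.List.sorted vecindario (fun x => x.2) false

-- ===== PRECONDITION & SPEC =====
def Spec_generar_vecindario (solucion : List Int) (out : List (List Int × Int)) : Prop := out = generar_vecindario_alt solucion
instance (solucion : List Int) (out : List (List Int × Int)) : Decidable (Spec_generar_vecindario solucion out) := by unfold Spec_generar_vecindario; infer_instance

-- ===== CLAIM (what is proved, stated in full; the proofs are below) =====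
def Claim_equal_generar_vecindario : Prop := ∀ (solucion : List Int), Dom_generar_vecindario solucion → Spec_generar_vecindario solucion (generar_vecindario solucion)

-- ===== LEMMAS AND PROOFS =====

-- the common counting spec: for each column j, the earlier columns i sharing a diagonal with it
def pvG (v : List Int) (i j : Nat) : Int :=
  (if v.getD i 0 - (i : Int) = v.getD j 0 - (j : Int) then 1 else 0)
    + (if v.getD i 0 + (i : Int) = v.getD j 0 + (j : Int) then 1 else 0)

def pvT (v : List Int) : Int :=
  ∑ j ∈ Finset.range v.length, ∑ i ∈ Finset.range j, pvG v i j

-- B's running count, in processed-prefix / remaining-suffix form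
def pvBC : List (Int × Int) → Int → List Int → Int
  | _, _, [] => 0
  | done, s, x :: xs =>
      ((done.countP (fun p => p.2 - p.1 == x - s)) : Int)
        + ((done.countP (fun p => p.2 + p.1 == x + s)) : Int)
        + pvBC (done ++ [(s, x)]) (s + 1) xs

theorem pv_sum_swap (N : Nat) (f : Nat → Nat → Int) :
    ∑ i ∈ Finset.range N, ∑ j ∈ Finset.Ico (i + 1) N, f i j
      = ∑ j ∈ Finset.range N, ∑ i ∈ Finset.range j, f i j := by
  induction N with
  | zero => simp
  | succ n ih =>
    rw [Finset.sum_range_succ, Finset.sum_range_succ]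
    have h1 : ∀ i ∈ Finset.range n, ∑ j ∈ Finset.Ico (i + 1) (n + 1), f i j
        = (∑ j ∈ Finset.Ico (i + 1) n, f i j) + f i n := by
      intro i hi
      rw [Finset.sum_Ico_succ_top (by simpa using Finset.mem_range.mp hi)]
    rw [Finset.sum_congr rfl h1, Finset.sum_add_distrib, ih]
    simp

theorem pvA_count (v : List Int) : contar_colisiones v = pvT v := by
  unfold contar_colisiones
  set N := v.length with hN
  have hstep : ∀ i : Int, (fun (c : Int) (j : Int) =>
      if (PySem.List.pyGetD v i 0 - PySem.List.pyGetD v j 0).natAbs = (i - j).natAbs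
      then c + 1 else c)
      = (fun c j => c + (if (PySem.List.pyGetD v i 0 - PySem.List.pyGetD v j 0).natAbs = (i - j).natAbs then (1:Int) else 0)) := by
    intro i; funext c j; split_ifs <;> ring
  simp only [hstep, PySem.List.foldl_add]
  rw [zero_add, PySem.List.pyRange_zero_natCast, List.map_map]
  have hlist : ∀ (m : Nat) (f : Nat → Int), ((List.range m).map f).sum = ∑ k ∈ Finset.range m, f k := by
    intro m f; exact Int.neg_inj.mp rfl
  rw [hlist]
  have hpt : ∀ (a b : Int) (k j : Nat), k < j →
      (if (a - b).natAbs = ((k : Int) - (j : Int)).natAbs then (1:Int) else 0)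
        = (if a - (k : Int) = b - (j : Int) then (1:Int) else 0)
          + (if a + (k : Int) = b + (j : Int) then (1:Int) else 0) := by
    intro a b k j h
    split_ifs <;> omega
  have hinner : ∀ k ∈ Finset.range N,
      ((PySem.List.pyRange (((k : Nat) : Int) + 1) (N : Int)).map
        (fun j => if (PySem.List.pyGetD v ((k : Nat) : Int) 0 - PySem.List.pyGetD v j 0).natAbs
                    = (((k : Nat) : Int) - j).natAbs then (1:Int) else 0)).sum
        = ∑ j ∈ Finset.Ico (k + 1) N, pvG v k j := by
    intro k hk
    have hc : (((k : Nat) : Int) + 1) = (((k + 1 : Nat) : Nat) : Int) := by push_cast; ring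
    rw [hc, PySem.List.pyRange_one, List.map_map]
    have ht : ((((N : Nat) : Int)) - (((k + 1 : Nat) : Nat) : Int)).toNat = N - (k + 1) := by omega
    rw [ht, hlist (N - (k + 1)) (fun t => _), Finset.sum_Ico_eq_sum_range]
    apply Finset.sum_congr rfl
    intro t ht
    have hcast : ((((k + 1 : Nat) : Nat) : Int) + ((t : Nat) : Int)) = (((k + 1 + t : Nat) : Nat) : Int) := by
      push_cast; ring
    simp only [Function.comp_apply, hcast, PySem.List.pyGetD_natCast]
    rw [hpt _ _ k (k + 1 + t) (by omega)]
    rfl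
  rw [Finset.sum_congr rfl (fun k hk => by simpa using hinner k hk)]
  rw [pv_sum_swap N (fun i j => pvG v i j), pvT]

theorem pvB_fold (xs : List Int) : ∀ (s : Int) (done : List (Int × Int))
    (d1 d2 : PySem.Dict Int Int) (c : Int),
    (∀ k, d1.getD k 0 = ((done.countP (fun p => p.2 - p.1 == k)) : Int)) →
    (∀ k, d2.getD k 0 = ((done.countP (fun p => p.2 + p.1 == k)) : Int)) →
    ((PySem.List.enumerate xs s).foldl
      (fun (st : PySem.Dict Int Int × PySem.Dict Int Int × Int) iv =>
        let i := iv.1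
        let v := iv.2
        let d1 := st.1
        let d2 := st.2.1
        let c := st.2.2 + d1.getD (v - i) 0 + d2.getD (v + i) 0
        (d1.insert (v - i) (d1.getD (v - i) 0 + 1), d2.insert (v + i) (d2.getD (v + i) 0 + 1), c))
      (d1, d2, c)).2.2 = c + pvBC done s xs := by
  induction xs with
  | nil => intro s done d1 d2 c h1 h2; simp [pvBC]
  | cons x xs ih =>
    intro s done d1 d2 c h1 h2
    rw [PySem.List.enumerate_cons, List.foldl_cons]
    have e1 : ∀ k, (d1.insert (x - s) (d1.getD (x - s) 0 + 1)).getD k 0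
        = (((done ++ [(s, x)]).countP (fun p => p.2 - p.1 == k)) : Int) := by
      intro k
      rw [PySem.Dict.getD_insert, List.countP_append]
      by_cases hk : k = x - s
      · subst hk; rw [if_pos rfl, h1]; simp
      · rw [if_neg hk, h1]
        have hfalse : ((fun p : Int × Int => p.2 - p.1 == k) (s, x)) = false := by simp; omega
        simp [hfalse]
    have e2 : ∀ k, (d2.insert (x + s) (d2.getD (x + s) 0 + 1)).getD k 0
        = (((done ++ [(s, x)]).countP (fun p => p.2 + p.1 == k)) : Int) := by
      intro k
      rw [PySem.Dict.getD_insert, List.countP_append]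
      by_cases hk : k = x + s
      · subst hk; rw [if_pos rfl, h2]; simp
      · rw [if_neg hk, h2]
        have hfalse : ((fun p : Int × Int => p.2 + p.1 == k) (s, x)) = false := by simp; omega
        simp [hfalse]
    rw [ih (s + 1) (done ++ [(s, x)]) _ _ _ e1 e2]
    rw [pvBC, h1, h2]
    ring

theorem pv_countP_enum (p : List Int) (q : Int → Int → Bool) : ∀ s : Int,
    ((PySem.List.enumerate p s).countP (fun r => q r.1 r.2) : Int)
      = ∑ i ∈ Finset.range p.length, (if q (s + (i : Int)) (p.getD i 0) then (1 : Int) else 0) := by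
  induction p with
  | nil => intro s; simp
  | cons y p ih =>
    intro s
    rw [PySem.List.enumerate_cons, List.countP_cons]
    push_cast
    rw [ih (s + 1)]
    rw [List.length_cons, Finset.sum_range_succ']
    have hsh : ∀ i ∈ Finset.range p.length,
        (if q (s + ((i + 1 : Nat) : Int)) ((y :: p).getD (i + 1) 0) then (1 : Int) else 0)
          = (if q ((s + 1) + (i : Int)) (p.getD i 0) then (1 : Int) else 0) := by
      intro i hi
      have h : s + ((i + 1 : Nat) : Int) = (s + 1) + (i : Int) := by push_cast; ring
      rw [h]; rfl
    rw [Finset.sum_congr rfl hsh]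
    simp

theorem pvBC_spec (xs : List Int) : ∀ p : List Int,
    pvBC (PySem.List.enumerate p 0) (p.length : Int) xs
      = ∑ j ∈ Finset.Ico p.length (p.length + xs.length), ∑ i ∈ Finset.range j, pvG (p ++ xs) i j := by
  induction xs with
  | nil => intro p; simp [pvBC]
  | cons x xs ih =>
    intro p
    rw [pvBC]
    have hen : PySem.List.enumerate p 0 ++ [((p.length : Int), x)]
        = PySem.List.enumerate (p ++ [x]) 0 := by
      rw [PySem.List.enumerate_append]
      simp [PySem.List.enumerate]
    have hlen : ((p.length : Int) + 1) = (((p ++ [x]).length : Nat) : Int) := by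
      simp
    rw [hen, hlen, ih (p ++ [x])]
    have hw : (p ++ [x]) ++ xs = p ++ x :: xs := by simp
    rw [hw]
    simp only [List.length_append, List.length_cons, List.length_nil, Nat.zero_add]
    have hx : (p ++ x :: xs).getD p.length 0 = x := by
      rw [List.getD_append_right _ _ _ _ (le_refl _)]; simp
    have hcnt1 : ((PySem.List.enumerate p 0).countP (fun r => r.2 - r.1 == x - (p.length : Int)) : Int)
        = ∑ i ∈ Finset.range p.length,
            (if (p ++ x :: xs).getD i 0 - (i : Int) = (p ++ x :: xs).getD p.length 0 - (p.length : Int)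
             then (1 : Int) else 0) := by
      rw [pv_countP_enum p (fun i a => a - i == x - (p.length : Int)) 0]
      apply Finset.sum_congr rfl
      intro i hi
      have hip : i < p.length := Finset.mem_range.mp hi
      rw [hx, List.getD_append _ _ _ _ hip]
      simp only [beq_iff_eq, zero_add]
    have hcnt2 : ((PySem.List.enumerate p 0).countP (fun r => r.2 + r.1 == x + (p.length : Int)) : Int)
        = ∑ i ∈ Finset.range p.length,
            (if (p ++ x :: xs).getD i 0 + (i : Int) = (p ++ x :: xs).getD p.length 0 + (p.length : Int)
             then (1 : Int) else 0) := by
      rw [pv_countP_enum p (fun i a => a + i == x + (p.length : Int)) 0]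
      apply Finset.sum_congr rfl
      intro i hi
      have hip : i < p.length := Finset.mem_range.mp hi
      rw [hx, List.getD_append _ _ _ _ hip]
      simp only [beq_iff_eq, zero_add]
    have hb : p.length + (xs.length + 1) = p.length + 1 + xs.length := by omega
    have heq := Finset.sum_eq_sum_Ico_succ_bot
      (show p.length < p.length + 1 + xs.length by omega)
      (fun j => ∑ i ∈ Finset.range j, pvG (p ++ x :: xs) i j)
    rw [hb, heq, hcnt1, hcnt2, ← Finset.sum_add_distrib]
    have hfirst : ∑ i ∈ Finset.range p.length, pvG (p ++ x :: xs) i p.length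
        = ∑ i ∈ Finset.range p.length,
            ((if (p ++ x :: xs).getD i 0 - (i : Int) = (p ++ x :: xs).getD p.length 0 - (p.length : Int) then (1:Int) else 0)
              + (if (p ++ x :: xs).getD i 0 + (i : Int) = (p ++ x :: xs).getD p.length 0 + (p.length : Int) then (1:Int) else 0)) := rfl
    rw [← hfirst]

theorem pvB_count (v : List Int) : contar_colisiones_lineal v = pvT v := by
  have h0 : ∀ k : Int, (PySem.Dict.empty : PySem.Dict Int Int).getD k 0
      = ((([] : List (Int × Int)).countP (fun p => p.2 - p.1 == k)) : Int) := by simp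
  have h0' : ∀ k : Int, (PySem.Dict.empty : PySem.Dict Int Int).getD k 0
      = ((([] : List (Int × Int)).countP (fun p => p.2 + p.1 == k)) : Int) := by simp
  unfold contar_colisiones_lineal
  rw [pvB_fold v 0 [] _ _ 0 h0 h0']
  have hs := pvBC_spec v []
  simp only [PySem.List.enumerate_nil, List.length_nil, Nat.cast_zero, List.nil_append,
    Nat.zero_add] at hs
  rw [hs, pvT, zero_add]
  rw [Finset.range_eq_Ico]

theorem pv_swap_eq (v : List Int) (i j : Int) (h0 : 0 ≤ i) (hij : i < j) (hj : j < (v.length : Int)) :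
    PySem.List.pySetD (PySem.List.pySetD v i (PySem.List.pyGetD v j 0)) j (PySem.List.pyGetD v i 0)
      = PySem.List.slice v none (some i) ++ [PySem.List.pyGetD v j 0]
          ++ PySem.List.slice v (some (i + 1)) (some j) ++ [PySem.List.pyGetD v i 0]
          ++ PySem.List.slice v (some (j + 1)) none := by
  obtain ⟨a, rfl⟩ : ∃ a : Nat, i = (a : Int) := ⟨i.toNat, (Int.toNat_of_nonneg h0).symm⟩
  obtain ⟨b, rfl⟩ : ∃ b : Nat, j = (b : Int) := ⟨j.toNat, (Int.toNat_of_nonneg (by omega)).symm⟩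
  have hab : a < b := by exact_mod_cast hij
  have hbv : b < v.length := by exact_mod_cast hj
  have c1 : ((a : Int) + 1) = ((a + 1 : Nat) : Int) := by push_cast; ring
  have c2 : ((b : Int) + 1) = ((b + 1 : Nat) : Int) := by push_cast; ring
  rw [c1, c2, PySem.List.pySetD_natCast, PySem.List.pySetD_natCast, PySem.List.pyGetD_natCast,
    PySem.List.pyGetD_natCast, PySem.List.slice_to_natCast, PySem.List.slice_natCast,
    PySem.List.slice_from_natCast]
  have e1 : v.set a (v.getD b 0) = (v.take a ++ [v.getD b 0]) ++ v.drop (a + 1) := by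
    rw [List.set_eq_take_append_cons_drop, if_pos (by omega)]; simp
  rw [e1, List.set_append_right _ _ (by simp; omega)]
  have hlen : (v.take a ++ [v.getD b 0]).length = a + 1 := by simp; omega
  rw [hlen, List.set_eq_take_append_cons_drop, if_pos (by simp; omega), List.drop_drop,
    show (a + 1) + (b - (a + 1) + 1) = b + 1 by omega]
  simp

-- ===== VERDICT (by name: the statement is the Claim_ definition above) =====
theorem generar_vecindario_spec : Claim_equal_generar_vecindario := by
  intro solucion _
  show generar_vecindario solucion = generar_vecindario_alt solucion
  unfold generar_vecindario generar_vecindario_alt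
  simp only [PySem.List.foldl_append_singleton_eq_map, PySem.List.foldl_append_eq_flatMap,
    List.map_flatMap, List.map_map, List.nil_append]
  have h : (PySem.List.pyRange 0 (solucion.length : Int) 1).flatMap
        (fun i => (PySem.List.pyRange (i + 1) (solucion.length : Int) 1).map (fun j =>
          (PySem.List.pySetD (PySem.List.pySetD solucion i (PySem.List.pyGetD solucion j 0)) j
              (PySem.List.pyGetD solucion i 0),
            contar_colisiones (PySem.List.pySetD (PySem.List.pySetD solucion i
              (PySem.List.pyGetD solucion j 0)) j (PySem.List.pyGetD solucion i 0)))))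
      = (PySem.List.pyRange 0 (solucion.length : Int) 1).flatMap
        (fun i => (PySem.List.pyRange (i + 1) (solucion.length : Int) 1).map (fun j =>
          ((fun v => (v, contar_colisiones_lineal v))
            (PySem.List.slice solucion none (some i) ++ [PySem.List.pyGetD solucion j 0]
              ++ PySem.List.slice solucion (some (i + 1)) (some j)
              ++ [PySem.List.pyGetD solucion i 0]
              ++ PySem.List.slice solucion (some (j + 1)) none)))) := by
    apply List.flatMap_congr
    intro i hi
    apply List.map_congr_left
    intro j hj
    have hi' := (PySem.List.mem_pyRange_one).mp hi
    have hj' := (PySem.List.mem_pyRange_one).mp hj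
    have hswap := pv_swap_eq solucion i j hi'.1 (by omega) hj'.2
    rw [hswap]
    have hcnt : contar_colisiones (PySem.List.slice solucion none (some i)
          ++ [PySem.List.pyGetD solucion j 0]
          ++ PySem.List.slice solucion (some (i + 1)) (some j)
          ++ [PySem.List.pyGetD solucion i 0]
          ++ PySem.List.slice solucion (some (j + 1)) none)
        = contar_colisiones_lineal (PySem.List.slice solucion none (some i)
          ++ [PySem.List.pyGetD solucion j 0]
          ++ PySem.List.slice solucion (some (i + 1)) (some j)
          ++ [PySem.List.pyGetD solucion i 0]
          ++ PySem.List.slice solucion (some (j + 1)) none) := by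
      rw [pvA_count, pvB_count]
    rw [hcnt]
  rw [h]
  rfl
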